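-- pv_equiv track=rewrite | github.com/SalemWitchz/oraculo-academico | data/csv_importer.py | _find_work_hours_col
-- ===== SOURCE A (Python) =====
-- def _find_work_hours_col(col_n: dict[str, str]) -> str | None:
--     candidates = []
--     for n, orig in col_n.items():
--         if "cuantas horas al dia" in n or "cuantas horas al d" in n:
--             if ("estudio" not in n and "computadora" not in n
--                     and "actividades" not in n and "dedicas" not in n):
--                 candidates.append((len(n), orig))
--     candidates.sort()
--     return candidates[0][1] if candidates else None
-- ===== SOURCE B (Python) =====
-- def _is_work_hours_key(n):
--     if "cuantas horas al dia" not in n and "cuantas horas al d" not in n: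
--         return False
--     return not any(bad in n for bad in ("estudio", "computadora", "actividades", "dedicas"))
--
--
-- def _find_work_hours_col(col_n):
--     best_len = None
--     best_orig = None
--     for n, orig in col_n.items():
--         if not _is_work_hours_key(n):
--             continue
--         ln = len(n)
--         if best_len is None or ln < best_len or (ln == best_len and orig < best_orig):
--             best_len, best_orig = ln, orig
--     return best_orig
-- ===== Notes on version B (the rewrite author's own statement) =====
-- stated objective: alternative
-- what changed: Replaces collect-then-sort-then-index with a single online pass keeping a running lexicographic minimum of (len(name), orig) under strict tuple <, so no candidate list and no sort.
import Mathlib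
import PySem

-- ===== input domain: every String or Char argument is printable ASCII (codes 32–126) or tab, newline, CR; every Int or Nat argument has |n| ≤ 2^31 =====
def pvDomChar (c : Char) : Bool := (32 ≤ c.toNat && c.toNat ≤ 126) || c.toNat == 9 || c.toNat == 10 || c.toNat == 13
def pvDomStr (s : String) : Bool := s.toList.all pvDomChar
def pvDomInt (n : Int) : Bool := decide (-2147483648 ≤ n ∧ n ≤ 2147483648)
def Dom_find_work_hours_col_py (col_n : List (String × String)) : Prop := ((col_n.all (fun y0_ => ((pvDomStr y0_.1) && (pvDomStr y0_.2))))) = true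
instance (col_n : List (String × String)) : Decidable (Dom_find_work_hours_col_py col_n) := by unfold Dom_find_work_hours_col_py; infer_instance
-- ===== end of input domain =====

-- B replaces A's collect-filter-sort-index by a single pass keeping a running lexicographic
-- minimum of (len(name), orig); same return value, no candidate list and no sort (alternative decomposition).


-- ===== PORT A =====
def find_work_hours_col_py (col_n : List (String × String)) : Option String :=
  let candidates := col_n.foldl (fun cands p =>
    if PySem.Str.isIn "cuantas horas al dia" p.1 || PySem.Str.isIn "cuantas horas al d" p.1 then
      if !PySem.Str.isIn "estudio" p.1 && !PySem.Str.isIn "computadora" p.1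
          && !PySem.Str.isIn "actividades" p.1 && !PySem.Str.isIn "dedicas" p.1 then
        cands ++ [(PySem.Str.len p.1, p.2)]
      else cands
    else cands) []
  -- candidates.sort(); return candidates[0][1] if candidates else None
  match PySem.List.sorted2 candidates (fun t => t.1) (fun t => t.2) with
  | [] => none
  | t :: _ => some t.2

-- ===== PORT B =====
def fwh_is_key (n : String) : Bool :=
  if !PySem.Str.isIn "cuantas horas al dia" n && !PySem.Str.isIn "cuantas horas al d" n then
    false
  else
    !(["estudio", "computadora", "actividades", "dedicas"].any (fun bad => PySem.Str.isIn bad n))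

def find_work_hours_col_py_alt (col_n : List (String × String)) : Option String :=
  (col_n.foldl (fun best p =>
    if !fwh_is_key p.1 then best
    else
      let ln := PySem.Str.len p.1
      match best with
      | none => some (ln, p.2)
      | some (bl, bo) =>
        if ln < bl || (ln == bl && decide (p.2 < bo)) then some (ln, p.2) else some (bl, bo)) none).map
    (fun t => t.2)

-- ===== PRECONDITION & SPEC =====
def Spec_find_work_hours_col_py (col_n : List (String × String)) (out : Option String) : Prop := out = find_work_hours_col_py_alt col_n
instance (col_n : List (String × String)) (out : Option String) : Decidable (Spec_find_work_hours_col_py col_n out) := by unfold Spec_find_work_hours_col_py; infer_instance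

-- ===== CLAIM (what is proved, stated in full; the proofs are below) =====
def Claim_equal_find_work_hours_col_py : Prop := ∀ (col_n : List (String × String)), Dom_find_work_hours_col_py col_n → Spec_find_work_hours_col_py col_n (find_work_hours_col_py col_n)

-- ===== LEMMAS AND PROOFS =====

-- A's combined guard as one Boolean
def fwh_condA (n : String) : Bool :=
  (PySem.Str.isIn "cuantas horas al dia" n || PySem.Str.isIn "cuantas horas al d" n)
    && (!PySem.Str.isIn "estudio" n && !PySem.Str.isIn "computadora" n
        && !PySem.Str.isIn "actividades" n && !PySem.Str.isIn "dedicas" n)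

theorem fwh_is_key_eq (n : String) : fwh_is_key n = fwh_condA n := by
  unfold fwh_is_key fwh_condA
  simp only [List.any_cons, List.any_nil, Bool.or_false]
  generalize PySem.Str.isIn "cuantas horas al dia" n = a
  generalize PySem.Str.isIn "cuantas horas al d" n = b
  generalize PySem.Str.isIn "estudio" n = c
  generalize PySem.Str.isIn "computadora" n = d
  generalize PySem.Str.isIn "actividades" n = e
  generalize PySem.Str.isIn "dedicas" n = f
  cases a <;> cases b <;> cases c <;> cases d <;> cases e <;> cases f <;> decide

-- the candidate entry A builds
def fwh_g (p : String × String) : Option (Int × String) :=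
  if fwh_condA p.1 then some (PySem.Str.len p.1, p.2) else none

-- B's running-minimum step on the Option accumulator
def fwh_step (b : Option (Int × String)) (t : Int × String) : Option (Int × String) :=
  match b with
  | none => some t
  | some (bl, bo) => if t.1 < bl || (t.1 == bl && decide (t.2 < bo)) then some t else some (bl, bo)

-- sorted2's pairwise comparison coincides with B's strict tuple < on Int x String
theorem fwh_lt_eq (a b : Int) (x y : String) :
    (decide (a < b) || (!decide (b < a) && decide (x < y)))
      = (a < b || (a == b && decide (x < y))) := by
  rcases lt_trichotomy a b with h | h | h
  · simp [h]
  · subst h; simp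
  · simp [h, not_lt_of_gt h, h.ne']

-- A's candidate-loop body, written through fwh_g
theorem fwh_stepA_eq :
    (fun (cands : List (Int × String)) (p : String × String) =>
      if PySem.Str.isIn "cuantas horas al dia" p.1 || PySem.Str.isIn "cuantas horas al d" p.1 then
        if !PySem.Str.isIn "estudio" p.1 && !PySem.Str.isIn "computadora" p.1
            && !PySem.Str.isIn "actividades" p.1 && !PySem.Str.isIn "dedicas" p.1 then
          cands ++ [(PySem.Str.len p.1, p.2)]
        else cands
      else cands)
      = fun cands p => cands ++ (fwh_g p).toList := by
  funext cands p
  unfold fwh_g fwh_condA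
  generalize (PySem.Str.isIn "cuantas horas al dia" p.1 || PySem.Str.isIn "cuantas horas al d" p.1) = c1
  generalize (!PySem.Str.isIn "estudio" p.1 && !PySem.Str.isIn "computadora" p.1
      && !PySem.Str.isIn "actividades" p.1 && !PySem.Str.isIn "dedicas" p.1) = c2
  cases c1 <;> cases c2 <;> simp

-- B's loop body, written through fwh_g and fwh_step
theorem fwh_stepB_eq :
    (fun (best : Option (Int × String)) (p : String × String) =>
      if !fwh_is_key p.1 then best
      else
        let ln := PySem.Str.len p.1
        match best with
        | none => some (ln, p.2)
        | some (bl, bo) =>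
          if ln < bl || (ln == bl && decide (p.2 < bo)) then some (ln, p.2) else some (bl, bo))
      = fun best p => match fwh_g p with | none => best | some t => fwh_step best t := by
  funext best p
  rw [show fwh_is_key p.1 = fwh_condA p.1 from fwh_is_key_eq p.1]
  unfold fwh_g
  cases h : fwh_condA p.1 <;> simp only [Bool.not_false, Bool.not_true, if_true]
  · rfl
  · cases best with
    | none => rfl
    | some q => obtain ⟨bl, bo⟩ := q; rfl

-- generic: append-if fold is a filterMap
theorem fwh_foldl_append (f : (String × String) → Option (Int × String))
    (xs : List (String × String)) (acc : List (Int × String)) :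
    xs.foldl (fun cands p => cands ++ (f p).toList) acc = acc ++ xs.filterMap f := by
  induction xs generalizing acc with
  | nil => simp
  | cons p xs ih =>
    cases h : f p <;> simp [h, ih]

-- generic: a guarded fold is a fold over the filterMap
theorem fwh_foldl_guard (f : (String × String) → Option (Int × String))
    (xs : List (String × String)) (b : Option (Int × String)) :
    xs.foldl (fun best p => match f p with | none => best | some t => fwh_step best t) b
      = (xs.filterMap f).foldl fwh_step b := by
  induction xs generalizing b with
  | nil => rfl
  | cons p xs ih =>
    cases h : f p <;> simp [h, ih]

-- head of one insertion step = one running-minimum step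
theorem fwh_head_insertBy (x : Int × String) (acc : List (Int × String)) :
    (PySem.List.insertBy
        (fun a b => decide (a.1 < b.1) || (!decide (b.1 < a.1) && decide (a.2 < b.2))) x acc).head?
      = fwh_step acc.head? x := by
  obtain ⟨xl, xo⟩ := x
  cases acc with
  | nil => rfl
  | cons y ys =>
    obtain ⟨yl, yo⟩ := y
    rw [PySem.List.insertBy]
    rw [fwh_lt_eq xl yl xo yo]
    have hs : fwh_step (some (yl, yo)) (xl, xo)
        = if (xl : Int) < yl || (xl == yl && decide (xo < yo)) then some (xl, xo) else some (yl, yo) := rfl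
    cases h : (decide ((xl : Int) < yl) || (xl == yl && decide (xo < yo)))
    · rw [if_neg Bool.false_ne_true, List.head?_cons, List.head?_cons, hs,
        if_neg (by rw [h]; exact Bool.false_ne_true)]
    · rw [if_pos rfl, List.head?_cons, List.head?_cons, hs, if_pos h]

-- head of the insertion-sort fold = the running-minimum fold
theorem fwh_head_sortFold (c : List (Int × String)) (acc : List (Int × String)) :
    (c.foldl (fun a x =>
        PySem.List.insertBy
          (fun a b => decide (a.1 < b.1) || (!decide (b.1 < a.1) && decide (a.2 < b.2))) x a) acc).head?
      = c.foldl fwh_step acc.head? := by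
  induction c generalizing acc with
  | nil => rfl
  | cons x c ih =>
    simp only [List.foldl_cons]
    rw [ih, fwh_head_insertBy]

theorem fwh_head_sorted2 (c : List (Int × String)) :
    (PySem.List.sorted2 c (fun t => t.1) (fun t => t.2)).head? = c.foldl fwh_step none := by
  unfold PySem.List.sorted2
  simpa using fwh_head_sortFold c []

-- ===== VERDICT (by name: the statement is the Claim_ definition above) =====
theorem find_work_hours_col_py_spec : Claim_equal_find_work_hours_col_py := by
  intro col_n _
  unfold Spec_find_work_hours_col_py find_work_hours_col_py find_work_hours_col_py_alt
  rw [fwh_stepA_eq, fwh_stepB_eq, fwh_foldl_append fwh_g col_n [],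
    fwh_foldl_guard fwh_g col_n none, List.nil_append, ← fwh_head_sorted2]
  cases hs : PySem.List.sorted2 (col_n.filterMap fwh_g) (fun t => t.1) (fun t => t.2) <;> simp [hs]
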